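-- pv_equiv track=rewrite | github.com/abcdise/English-vocab-builder | scr/Exercise.py | __replace_quotes
-- ===== SOURCE A (Python) =====
-- def __replace_quotes(text):
--     text_list = text.split(' ')
--     text_list_new = []
--     for word in text_list:
--         if word.startswith("'"):
--             word = '`' + word[1:]
--         if word.startswith('"'):
--             word = '``' + word[1:]
--         text_list_new.append(word)
--     return ' '.join(text_list_new)
-- ===== SOURCE B (Python) =====
-- def __replace_quotes(text):
--     def _scan(s, quote, repl):
--         out = []
--         at_start = True
--         for ch in s:
--             out.append(repl if (at_start and ch == quote) else ch)
--             at_start = (ch == ' ')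
--         return ''.join(out)
--     return _scan(_scan(text, "'", '`'), '"', '``')
-- ===== Notes on version B (the rewrite author's own statement) =====
-- stated objective: alternative
-- what changed: Replaced split-on-space / per-word branching / join with two single-pass character scans that track an at-token-start flag (start of string or right after a space) and substitute the quote character in place, so no word list is ever built.
import Mathlib
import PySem

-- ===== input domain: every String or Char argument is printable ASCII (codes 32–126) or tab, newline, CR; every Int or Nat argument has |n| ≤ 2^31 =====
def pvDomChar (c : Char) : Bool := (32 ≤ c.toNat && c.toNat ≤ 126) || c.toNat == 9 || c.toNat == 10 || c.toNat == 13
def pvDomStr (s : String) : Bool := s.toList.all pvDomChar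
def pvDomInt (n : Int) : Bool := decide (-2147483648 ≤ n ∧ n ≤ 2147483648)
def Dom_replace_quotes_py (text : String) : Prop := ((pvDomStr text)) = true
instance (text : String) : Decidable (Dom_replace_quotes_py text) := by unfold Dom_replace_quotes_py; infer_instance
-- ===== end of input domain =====

-- B replaces the split/map/join over words by two single character scans that track
-- "at token start" (start of string or right after a space); objective: simpler, no word list is built.

-- ===== PORT A =====
def replace_quotes_py (text : String) : String :=
  let text_list := PySem.Chars.splitOn text.toList [' ']
  let text_list_new := text_list.foldl (fun acc word =>
    let word := if PySem.Chars.startswith word ['\''] then ['`'] ++ PySem.Chars.slice word (some 1) none else word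
    let word := if PySem.Chars.startswith word ['"'] then ['`', '`'] ++ PySem.Chars.slice word (some 1) none else word
    acc ++ [word]) ([] : List (List Char))
  String.ofList (PySem.Chars.join [' '] text_list_new)

-- ===== PORT B =====
-- one character scan: replace q by rep when it is the first character of a space-split token
def pvScan (q : Char) (rep : List Char) : List Char → Bool → List Char
  | [], _ => []
  | c :: rest, atStart => (if atStart && (c == q) then rep else [c]) ++ pvScan q rep rest (c == ' ')

def replace_quotes_py_alt (text : String) : String :=
  String.ofList (pvScan '"' ['`', '`'] (pvScan '\'' ['`'] text.toList true) true)

-- ===== PRECONDITION & SPEC =====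
def Spec_replace_quotes_py (text : String) (out : String) : Prop := out = replace_quotes_py_alt text
instance (text : String) (out : String) : Decidable (Spec_replace_quotes_py text out) := by unfold Spec_replace_quotes_py; infer_instance

-- ===== CLAIM (what is proved, stated in full; the proofs are below) =====
def Claim_equal_replace_quotes_py : Prop := ∀ (text : String), Dom_replace_quotes_py text → Spec_replace_quotes_py text (replace_quotes_py text)

-- ===== LEMMAS AND PROOFS =====

-- (first word, remaining words) of a split on a single space
def pvSplitSp : List Char → List Char × List (List Char)
  | [] => ([], [])
  | c :: rest =>
    let p := pvSplitSp rest
    if c = ' ' then ([], p.1 :: p.2) else (c :: p.1, p.2)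

def pvJoinTail (l : List (List Char)) : List Char := l.flatMap (fun w => ' ' :: w)

-- per-word effect of one scan
def pvH (q : Char) (rep : List Char) : List Char → List Char
  | [] => []
  | c :: t => if c = q then rep ++ t else c :: t

-- per-word effect of A's loop body (both scans composed)
def pvG : List Char → List Char
  | [] => []
  | c :: t => if c = '\'' then '`' :: t else if c = '"' then '`' :: '`' :: t else c :: t

theorem pvJoinTail_cons (w : List Char) (l : List (List Char)) :
    pvJoinTail (w :: l) = ' ' :: (w ++ pvJoinTail l) := by
  simp [pvJoinTail]

theorem pvJoin_eq (a : List Char) (l : List (List Char)) :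
    PySem.Chars.join [' '] (a :: l) = a ++ pvJoinTail l := by
  induction l generalizing a with
  | nil => simp [PySem.Chars.join_singleton, pvJoinTail]
  | cons w l ih =>
      rw [PySem.Chars.join_cons_cons, ih, pvJoinTail_cons]
      simp

theorem pvGo_spec (l : List Char) : ∀ (fuel : Nat) (cur : List Char)
    (acc : List (List Char)), l.length ≤ fuel →
    PySem.Chars.splitOn.go [' '] fuel l cur acc
      = acc.reverse ++ ((cur.reverse ++ (pvSplitSp l).1) :: (pvSplitSp l).2) := by
  induction l with
  | nil =>
      intro fuel cur acc _
      cases fuel <;> simp [PySem.Chars.splitOn.go, pvSplitSp]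
  | cons c rest ih =>
      intro fuel cur acc hf
      cases fuel with
      | zero => simp at hf
      | succ n =>
          by_cases hc : c = ' '
          · subst hc
            rw [PySem.Chars.splitOn.go]
            simp only [List.isPrefixOf, beq_self_eq_true, Bool.and_true, if_true,
              List.length_cons, List.length_nil, List.drop_succ_cons, List.drop_zero]
            rw [ih n [] (cur.reverse :: acc) (by simpa using hf)]
            simp [pvSplitSp]
          · rw [PySem.Chars.splitOn.go]
            have hpre : ([' '].isPrefixOf (c :: rest)) = false := by
              simp [List.isPrefixOf]; exact fun h => (hc h.symm).elim
            rw [hpre]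
            simp only [Bool.false_eq_true, if_false]
            rw [ih n (c :: cur) acc (by simpa using hf)]
            simp [pvSplitSp, hc]

theorem pvSplitOn_eq (cs : List Char) :
    PySem.Chars.splitOn cs [' '] = (pvSplitSp cs).1 :: (pvSplitSp cs).2 := by
  rw [PySem.Chars.splitOn, pvGo_spec cs (cs.length + 1) [] [] (by omega)]
  simp

theorem pvScan_spec (q : Char) (rep : List Char) (hq : q ≠ ' ') (cs : List Char) :
    pvScan q rep cs true
      = pvH q rep (pvSplitSp cs).1 ++ pvJoinTail ((pvSplitSp cs).2.map (pvH q rep)) ∧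
    pvScan q rep cs false
      = (pvSplitSp cs).1 ++ pvJoinTail ((pvSplitSp cs).2.map (pvH q rep)) := by
  induction cs with
  | nil => simp [pvScan, pvSplitSp, pvH, pvJoinTail]
  | cons c rest ih =>
      by_cases hc : c = ' '
      · subst hc
        have hne : (' ' == q) = false := by
          simp; exact fun h => hq h.symm
        constructor <;>
        · rw [pvScan]
          simp [hne, pvSplitSp, pvH, pvJoinTail_cons, ih.1]
      · have hcs : (c == ' ') = false := by simp [hc]
        constructor <;>
        · rw [pvScan]
          simp only [hcs, Bool.true_and, Bool.false_and, Bool.false_eq_true, if_false]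
          rw [ih.2]
          by_cases hcq : c = q <;>
            simp [pvSplitSp, hc, pvH, hcq, hq]

theorem pvSplitSp_no_space (cs : List Char) :
    (' ' ∉ (pvSplitSp cs).1) ∧ (∀ w ∈ (pvSplitSp cs).2, ' ' ∉ w) := by
  induction cs with
  | nil => simp [pvSplitSp]
  | cons c rest ih =>
      by_cases hc : c = ' '
      · subst hc
        refine ⟨by simp [pvSplitSp], ?_⟩
        intro w hw
        simp [pvSplitSp] at hw
        rcases hw with h | h
        · subst h; exact ih.1
        · exact ih.2 w h
      · refine ⟨?_, by simpa [pvSplitSp, hc] using ih.2⟩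
        simp [pvSplitSp, hc]
        exact ⟨fun h => hc h.symm, ih.1⟩

theorem pvH_no_space (q : Char) (rep : List Char) (hrep : ' ' ∉ rep)
    (w : List Char) (hw : ' ' ∉ w) : ' ' ∉ pvH q rep w := by
  cases w with
  | nil => simp [pvH]
  | cons c t =>
      by_cases hcq : c = q
      · simp [pvH, hcq]
        exact ⟨hrep, fun h => hw (List.mem_cons_of_mem _ h)⟩
      · simpa [pvH, hcq] using hw

theorem pvSplitSp_append (l : List (List Char)) (hl : ∀ w ∈ l, ' ' ∉ w) :
    ∀ (a : List Char), ' ' ∉ a → pvSplitSp (a ++ pvJoinTail l) = (a, l) := by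
  induction l with
  | nil =>
      intro a ha
      induction a with
      | nil => simp [pvJoinTail, pvSplitSp]
      | cons c t iha =>
          have hc : c ≠ ' ' := by intro h; exact ha (by simp [h])
          simp [pvSplitSp, hc, iha (by intro h; exact ha (by simp [h]))]
  | cons w l ih =>
      intro a ha
      induction a with
      | nil =>
          rw [List.nil_append, pvJoinTail_cons]
          have := ih (fun u hu => hl u (by simp [hu])) w (hl w (by simp))
          simp [pvSplitSp, this]
      | cons c t iha =>
          have hc : c ≠ ' ' := by intro h; exact ha (by simp [h])
          simp only [List.cons_append, pvSplitSp, hc, if_false]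
          rw [iha (by intro h; exact ha (by simp [h]))]

theorem pvH_comp (w : List Char) :
    pvH '"' ['`', '`'] (pvH '\'' ['`'] w) = pvG w := by
  cases w with
  | nil => simp [pvH, pvG]
  | cons c t =>
      by_cases h1 : c = '\''
      · subst h1; simp [pvH, pvG]
      · by_cases h2 : c = '"'
        · subst h2; simp [pvH, pvG]
        · simp [pvH, pvG, h1, h2]

-- A's loop body equals pvG on every word
theorem pvBody_eq (w : List Char) :
    (let word := if PySem.Chars.startswith w ['\''] then ['`'] ++ PySem.Chars.slice w (some 1) none else w
     let word := if PySem.Chars.startswith word ['"'] then ['`', '`'] ++ PySem.Chars.slice word (some 1) none else word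
     word) = pvG w := by
  cases w with
  | nil => simp [PySem.Chars.startswith, List.isPrefixOf, pvG]
  | cons c t =>
      have hslice : PySem.List.slice (c :: t) (some 1) none = t := by
        rw [PySem.List.slice_from _ (by omega)]; simp
      by_cases h1 : c = '\''
      · subst h1
        simp [PySem.Chars.startswith, List.isPrefixOf, hslice, pvG]
      · by_cases h2 : c = '"'
        · subst h2
          simp [PySem.Chars.startswith, List.isPrefixOf, hslice, pvG]
        · simp [PySem.Chars.startswith, List.isPrefixOf, pvG, h1, h2, Ne.symm h1, Ne.symm h2]

-- A's foldl of the loop body appends one mapped word per step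
theorem pvFold_eq : ∀ (l : List (List Char)) (acc : List (List Char)),
    l.foldl (fun acc word =>
      let word := if PySem.Chars.startswith word ['\''] then ['`'] ++ PySem.Chars.slice word (some 1) none else word
      let word := if PySem.Chars.startswith word ['"'] then ['`', '`'] ++ PySem.Chars.slice word (some 1) none else word
      acc ++ [word]) acc = acc ++ l.map pvG := by
  intro l
  induction l with
  | nil => intro acc; simp
  | cons w l ih =>
      intro acc
      rw [List.foldl_cons, ih, List.map_cons, ← pvBody_eq w]
      simp

-- the whole equality, on the character lists
theorem pvMain (cs : List Char) :
    PySem.Chars.join [' ']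
      ((PySem.Chars.splitOn cs [' ']).foldl (fun acc word =>
        let word := if PySem.Chars.startswith word ['\''] then ['`'] ++ PySem.Chars.slice word (some 1) none else word
        let word := if PySem.Chars.startswith word ['"'] then ['`', '`'] ++ PySem.Chars.slice word (some 1) none else word
        acc ++ [word]) ([] : List (List Char)))
      = pvScan '"' ['`', '`'] (pvScan '\'' ['`'] cs true) true := by
  rw [pvSplitOn_eq, pvFold_eq, List.nil_append, List.map_cons, pvJoin_eq]
  have h1 := pvScan_spec '\'' ['`'] (by decide) cs
  have hs1 : ' ' ∉ pvH '\'' ['`'] (pvSplitSp cs).1 :=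
    pvH_no_space _ _ (by decide) _ (pvSplitSp_no_space cs).1
  have hs2 : ∀ w ∈ (pvSplitSp cs).2.map (pvH '\'' ['`']), ' ' ∉ w := by
    intro w hw
    rcases List.mem_map.mp hw with ⟨u, hu, rfl⟩
    exact pvH_no_space _ _ (by decide) _ ((pvSplitSp_no_space cs).2 u hu)
  have h2 := pvScan_spec '"' ['`', '`'] (by decide) (pvScan '\'' ['`'] cs true)
  rw [h1.1, pvSplitSp_append _ hs2 _ hs1] at h2
  dsimp only at h2
  rw [h1.1, h2.1]
  congr 1
  · exact (pvH_comp (pvSplitSp cs).1).symm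
  · refine congrArg pvJoinTail ?_
    rw [List.map_map]
    exact (List.map_congr_left fun w _ => pvH_comp w).symm

-- ===== VERDICT (by name: the statement is the Claim_ definition above) =====
theorem replace_quotes_py_spec : Claim_equal_replace_quotes_py := by
  intro text _
  show replace_quotes_py text = replace_quotes_py_alt text
  exact congrArg String.ofList (pvMain text.toList)
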